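-- pv_equiv track=rewrite | github.com/jfreed-dev/dgxc-benchmarking | cli/llmb-run/src/llmb_run/task_generation.py | _generate_scales_up_to_max
-- ===== SOURCE A (Python) =====
-- def _generate_scales_up_to_max(metadata_scales, max_scale, exact_scales):
--     """Generate list of scales to test up to max_scale.
--
--     Args:
--         metadata_scales: List of scales from metadata file
--         max_scale: Maximum scale (number of GPUs) to test, or None for metadata scales.
--         exact_scales: If True, only use scales from metadata (up to max)
--
--     Returns:
--         list: Sorted list of scales to test
--     """
--     if not metadata_scales:
--         return []
--
--     metadata_scales_int = sorted([int(s) for s in metadata_scales])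
--
--     if exact_scales:
--         # Only use scales from metadata (optionally up to max)
--         if max_scale is not None:
--             return [s for s in metadata_scales_int if s <= max_scale]
--         else:
--             return metadata_scales_int
--
--     # Use all metadata scales up to max, plus power-of-2 scales beyond max metadata scale
--     if max_scale is not None:
--         scales_to_test = [s for s in metadata_scales_int if s <= max_scale]
--
--         # If max_scale is greater than the highest metadata scale, add power-of-2 scales
--         max_metadata_scale = max(metadata_scales_int)
--         if max_scale > max_metadata_scale:
--             # Find next power of 2 after max_metadata_scale
--             next_power = 1
--             while next_power <= max_metadata_scale:
--                 next_power *= 2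
--
--             # Add power-of-2 scales up to max_scale
--             while next_power <= max_scale:
--                 scales_to_test.append(next_power)
--                 next_power *= 2
--     else:
--         # No max limit, just use metadata scales
--         scales_to_test = metadata_scales_int
--
--     return sorted(set(scales_to_test))
-- ===== SOURCE B (Python) =====
-- def _generate_scales_up_to_max(metadata_scales, max_scale, exact_scales):
--     """Same contract as A; power-of-2 exponent range computed in closed form via bit_length."""
--     if not metadata_scales:
--         return []
--
--     scales = sorted(int(s) for s in metadata_scales)
--
--     if exact_scales:
--         if max_scale is not None:
--             return [s for s in scales if s <= max_scale]
--         return scales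
--
--     if max_scale is None:
--         return sorted(set(scales))
--
--     top = max(scales)
--     # exponents k with top < 2**k <= max_scale, as a closed-form range (no loops)
--     powers = [1 << k for k in range(max(top, 0).bit_length(),
--                                     max(max_scale, 0).bit_length())]
--     return sorted({s for s in scales if s <= max_scale} | set(powers))
-- ===== Notes on version B (the rewrite author's own statement) =====
-- stated objective: alternative
-- what changed: B drops both of A's doubling while-loops: the power-of-2 exponent range is computed in closed form via bit_length (powers = [1<<k for k in range(max(top,0).bit_length(), max(max_scale,0).bit_length())], no max_scale>top guard needed), and the final list is built as a set-comprehension union with set(powers) instead of appending to a list and deduplicating.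
import Mathlib
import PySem

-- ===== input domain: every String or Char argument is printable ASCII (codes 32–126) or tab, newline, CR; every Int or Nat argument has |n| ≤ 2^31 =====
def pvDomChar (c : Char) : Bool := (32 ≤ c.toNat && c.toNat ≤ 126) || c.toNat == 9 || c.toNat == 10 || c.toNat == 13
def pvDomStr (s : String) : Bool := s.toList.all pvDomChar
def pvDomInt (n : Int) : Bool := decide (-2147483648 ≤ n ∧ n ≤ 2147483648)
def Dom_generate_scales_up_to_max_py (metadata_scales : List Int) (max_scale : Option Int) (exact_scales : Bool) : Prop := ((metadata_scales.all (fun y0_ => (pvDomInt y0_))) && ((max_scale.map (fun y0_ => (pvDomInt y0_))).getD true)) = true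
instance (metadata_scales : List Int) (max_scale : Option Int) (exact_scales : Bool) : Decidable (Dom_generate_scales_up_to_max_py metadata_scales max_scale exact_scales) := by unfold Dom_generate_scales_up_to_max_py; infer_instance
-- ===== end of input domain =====

-- B replaces A's two doubling while-loops by a closed-form exponent range computed with
-- bit_length and builds the result as a set union (objective: alternative decomposition).
-- A's while-loops are ported with a Nat fuel equal to their loop measure (the loop variable
-- starts at 1 and doubles, so it grows by at least 1 per step); the fuel only totalizes the
-- same computation (pvFindNext_unfold / pvCollect_unfold recover the exact Python recurrence).

-- ===== PORT A =====
-- 'next_power = 1; while next_power <= max_metadata_scale: next_power *= 2'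
def pvFindNextGo : Nat → Int → Int → Int
  | 0, np, _ => np
  | f + 1, np, m => if np ≤ m then pvFindNextGo f (2 * np) m else np

def pvFindNext (np m : Int) : Int := pvFindNextGo (m + 1 - np).toNat np m

-- 'while next_power <= max_scale: scales_to_test.append(next_power); next_power *= 2'
def pvCollectGo : Nat → Int → Int → List Int
  | 0, _, _ => []
  | f + 1, np, mx => if np ≤ mx then np :: pvCollectGo f (2 * np) mx else []

def pvCollect (np mx : Int) : List Int := pvCollectGo (mx + 1 - np).toNat np mx

def generate_scales_up_to_max_py (metadata_scales : List Int) (max_scale : Option Int) (exact_scales : Bool) : List Int :=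
  if metadata_scales = [] then []
  else
    let metadata_scales_int := PySem.List.sorted metadata_scales (fun x => x) false
    if exact_scales then
      match max_scale with
      | some mx => metadata_scales_int.filter (fun s => decide (s ≤ mx))
      | none => metadata_scales_int
    else
      match max_scale with
      | some mx =>
        let scales_to_test := metadata_scales_int.filter (fun s => decide (s ≤ mx))
        let max_metadata_scale := (PySem.List.max? metadata_scales_int (fun x => x)).getD 0
        let scales_to_test :=
          if max_metadata_scale < mx then
            scales_to_test ++ pvCollect (pvFindNext 1 max_metadata_scale) mx
          else scales_to_test
        PySem.List.sorted (PySem.Set.ofList scales_to_test) (fun x => x) false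
      | none => PySem.List.sorted (PySem.Set.ofList metadata_scales_int) (fun x => x) false

-- ===== PORT B =====
-- 'powers = [1 << k for k in range(max(top,0).bit_length(), max(max_scale,0).bit_length())]'
-- and 'sorted({s for s in scales if s <= max_scale} | set(powers))'
def generate_scales_up_to_max_py_alt (metadata_scales : List Int) (max_scale : Option Int) (exact_scales : Bool) : List Int :=
  if metadata_scales = [] then []
  else
    let scales := PySem.List.sorted metadata_scales (fun x => x) false
    if exact_scales then
      match max_scale with
      | some mx => scales.filter (fun s => decide (s ≤ mx))
      | none => scales
    else
      match max_scale with
      | none => PySem.List.sorted (PySem.Set.ofList scales) (fun x => x) false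
      | some mx =>
        let top := (PySem.List.max? scales (fun x => x)).getD 0
        let powers :=
          (PySem.List.pyRange (PySem.Int.bitLength (max top 0) : Int)
              (PySem.Int.bitLength (max mx 0) : Int) 1).map (fun k => (2:Int) ^ k.toNat)
        PySem.List.sorted
          (PySem.Set.union (PySem.Set.ofList (scales.filter (fun s => decide (s ≤ mx)))) powers)
          (fun x => x) false

-- ===== PRECONDITION & SPEC =====
def Spec_generate_scales_up_to_max_py (metadata_scales : List Int) (max_scale : Option Int) (exact_scales : Bool) (out : List Int) : Prop := out = generate_scales_up_to_max_py_alt metadata_scales max_scale exact_scales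
instance (metadata_scales : List Int) (max_scale : Option Int) (exact_scales : Bool) (out : List Int) : Decidable (Spec_generate_scales_up_to_max_py metadata_scales max_scale exact_scales out) := by unfold Spec_generate_scales_up_to_max_py; infer_instance

-- ===== CLAIM (what is proved, stated in full; the proofs are below) =====
def Claim_equal_generate_scales_up_to_max_py : Prop := ∀ (metadata_scales : List Int) (max_scale : Option Int) (exact_scales : Bool), Dom_generate_scales_up_to_max_py metadata_scales max_scale exact_scales → Spec_generate_scales_up_to_max_py metadata_scales max_scale exact_scales (generate_scales_up_to_max_py metadata_scales max_scale exact_scales)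

-- ===== LEMMAS AND PROOFS =====

-- fuel irrelevance: any fuel at least the loop measure computes the same value
theorem pvFindNextGo_congr (m : Int) : ∀ (f g : Nat) (np : Int), 1 ≤ np →
    (m + 1 - np).toNat ≤ f → (m + 1 - np).toNat ≤ g →
    pvFindNextGo f np m = pvFindNextGo g np m := by
  intro f
  induction f with
  | zero =>
    intro g np h1 hf _
    have hm : ¬ np ≤ m := by omega
    cases g with
    | zero => rfl
    | succ g => simp [pvFindNextGo, hm]
  | succ f ih =>
    intro g np h1 hf hg
    cases g with
    | zero =>
      have hm : ¬ np ≤ m := by omega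
      simp [pvFindNextGo, hm]
    | succ g =>
      by_cases hle : np ≤ m
      · simp only [pvFindNextGo, hle, if_true]
        exact ih g (2 * np) (by omega) (by omega) (by omega)
      · simp [pvFindNextGo, hle]

-- the exact Python recurrence of A's 'find next power' loop (1 ≤ np is its invariant)
theorem pvFindNext_unfold (np m : Int) (h : 1 ≤ np) :
    pvFindNext np m = if np ≤ m then pvFindNext (2 * np) m else np := by
  unfold pvFindNext
  by_cases hle : np ≤ m
  · have ht : (m + 1 - np).toNat = ((m + 1 - np).toNat - 1) + 1 := by omega
    rw [ht]
    simp only [pvFindNextGo, hle, if_true]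
    exact pvFindNextGo_congr m ((m + 1 - np).toNat - 1) (m + 1 - 2 * np).toNat (2 * np)
      (by omega) (by omega) (by omega)
  · cases ht : (m + 1 - np).toNat with
    | zero => simp [pvFindNextGo, hle]
    | succ k => simp [pvFindNextGo, hle]

theorem pvCollectGo_congr (mx : Int) : ∀ (f g : Nat) (np : Int), 1 ≤ np →
    (mx + 1 - np).toNat ≤ f → (mx + 1 - np).toNat ≤ g →
    pvCollectGo f np mx = pvCollectGo g np mx := by
  intro f
  induction f with
  | zero =>
    intro g np h1 hf _
    have hm : ¬ np ≤ mx := by omega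
    cases g with
    | zero => rfl
    | succ g => simp [pvCollectGo, hm]
  | succ f ih =>
    intro g np h1 hf hg
    cases g with
    | zero =>
      have hm : ¬ np ≤ mx := by omega
      simp [pvCollectGo, hm]
    | succ g =>
      by_cases hle : np ≤ mx
      · simp only [pvCollectGo, hle, if_true]
        exact congrArg _ (ih g (2 * np) (by omega) (by omega) (by omega))
      · simp [pvCollectGo, hle]

-- the exact Python recurrence of A's appending loop
theorem pvCollect_unfold (np mx : Int) (h : 1 ≤ np) :
    pvCollect np mx = if np ≤ mx then np :: pvCollect (2 * np) mx else [] := by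
  unfold pvCollect
  by_cases hle : np ≤ mx
  · have ht : (mx + 1 - np).toNat = ((mx + 1 - np).toNat - 1) + 1 := by omega
    rw [ht]
    simp only [pvCollectGo, hle, if_true]
    exact congrArg _ (pvCollectGo_congr mx ((mx + 1 - np).toNat - 1) (mx + 1 - 2 * np).toNat
      (2 * np) (by omega) (by omega) (by omega))
  · cases ht : (mx + 1 - np).toNat with
    | zero => simp [pvCollectGo, hle]
    | succ k => simp [pvCollectGo, hle]

-- '2^j ≤ m' is exactly 'j < max(m,0).bit_length()'
theorem pvPowLeIff (m : Int) (j : Nat) :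
    (2:Int) ^ j ≤ m ↔ j < PySem.Int.bitLength (max m 0) := by
  constructor
  · intro h
    have hm0 : (0:Int) < m := lt_of_lt_of_le (by positivity) h
    have hmax : max m 0 = m := by omega
    have hlt := PySem.Int.lt_two_pow_bitLength (max m 0)
    rw [hmax] at hlt
    have h2 : (2:Nat) ^ j ≤ m.natAbs := by
      have hc : ((2:Nat) ^ j : Int) ≤ (m.natAbs : Int) := by
        push_cast
        rw [abs_of_pos hm0]
        exact h
      exact_mod_cast hc
    have hlt2 : (2:Nat) ^ j < 2 ^ PySem.Int.bitLength m := lt_of_le_of_lt h2 hlt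
    rw [hmax]
    exact (Nat.pow_lt_pow_iff_right (a := 2) (by norm_num)).mp hlt2
  · intro h
    have hne : max m 0 ≠ 0 := by
      intro h0
      rw [h0] at h
      simp [PySem.Int.bitLength_zero] at h
    have hm0 : (0:Int) < m := by omega
    have hmax : max m 0 = m := by omega
    rw [hmax] at h
    have hle := PySem.Int.two_pow_bitLength_le m (by omega)
    have h2 : (2:Nat) ^ j ≤ 2 ^ (PySem.Int.bitLength m - 1) :=
      Nat.pow_le_pow_right (by norm_num) (by omega)
    have h3 : (2:Nat) ^ j ≤ m.natAbs := le_trans h2 hle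
    have hc : ((2:Nat) ^ j : Int) ≤ (m.natAbs : Int) := by exact_mod_cast h3
    push_cast at hc
    rw [abs_of_pos hm0] at hc
    exact hc

-- A's first loop from 2^j lands on 2^(max j bit_length)
theorem pvFindNextChar (m : Int) : ∀ (n : Nat) (j : Nat), (m + 1 - 2 ^ j).toNat ≤ n →
    pvFindNext ((2:Int) ^ j) m = 2 ^ (max j (PySem.Int.bitLength (max m 0))) := by
  intro n
  induction n with
  | zero =>
    intro j hn
    have hpos : (1:Int) ≤ 2 ^ j := one_le_pow₀ (by norm_num)
    have hnle : ¬ (2:Int) ^ j ≤ m := by omega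
    rw [pvFindNext_unfold _ _ hpos, if_neg hnle]
    have : PySem.Int.bitLength (max m 0) ≤ j := by
      by_contra hc
      exact hnle ((pvPowLeIff m j).mpr (by omega))
    rw [Nat.max_eq_left this]
  | succ n ih =>
    intro j hn
    have hpos : (1:Int) ≤ 2 ^ j := one_le_pow₀ (by norm_num)
    by_cases hle : (2:Int) ^ j ≤ m
    · have hj : j < PySem.Int.bitLength (max m 0) := (pvPowLeIff m j).mp hle
      rw [pvFindNext_unfold _ _ hpos, if_pos hle]
      have h2 : (2:Int) * 2 ^ j = 2 ^ (j + 1) := by ring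
      rw [h2, ih (j + 1) (by
        have h3 : (2:Int) ^ (j+1) = 2 * 2 ^ j := by ring
        omega)]
      congr 1
      omega
    · have : PySem.Int.bitLength (max m 0) ≤ j := by
        by_contra hc
        exact hle ((pvPowLeIff m j).mpr (by omega))
      rw [pvFindNext_unfold _ _ hpos, if_neg hle, Nat.max_eq_left this]

-- A's second loop from 2^j is exactly B's closed-form comprehension
theorem pvCollectChar (mx : Int) : ∀ (n : Nat) (j : Nat), (mx + 1 - 2 ^ j).toNat ≤ n →
    pvCollect ((2:Int) ^ j) mx =
      (PySem.List.pyRange (j : Int) (PySem.Int.bitLength (max mx 0) : Int) 1).map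
        (fun k => (2:Int) ^ k.toNat) := by
  intro n
  induction n with
  | zero =>
    intro j hn
    have hpos : (1:Int) ≤ 2 ^ j := one_le_pow₀ (by norm_num)
    have hnle : ¬ (2:Int) ^ j ≤ mx := by omega
    have hej : PySem.Int.bitLength (max mx 0) ≤ j := by
      by_contra hc
      exact hnle ((pvPowLeIff mx j).mpr (by omega))
    rw [pvCollect_unfold _ _ hpos, if_neg hnle,
      PySem.List.pyRange_one_eq_nil (by exact_mod_cast hej), List.map_nil]
  | succ n ih =>
    intro j hn
    have hpos : (1:Int) ≤ 2 ^ j := one_le_pow₀ (by norm_num)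
    by_cases hle : (2:Int) ^ j ≤ mx
    · have hj : j < PySem.Int.bitLength (max mx 0) := (pvPowLeIff mx j).mp hle
      rw [pvCollect_unfold _ _ hpos, if_pos hle,
        PySem.List.pyRange_one_cons (by exact_mod_cast hj), List.map_cons]
      have h2 : (2:Int) * 2 ^ j = 2 ^ (j + 1) := by ring
      rw [h2, ih (j + 1) (by
        have h3 : (2:Int) ^ (j+1) = 2 * 2 ^ j := by ring
        omega)]
      have hcast : ((j:Int) + 1) = ((j + 1 : Nat) : Int) := by push_cast; ring
      rw [hcast]
      simp
    · have hej : PySem.Int.bitLength (max mx 0) ≤ j := by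
        by_contra hc
        exact hle ((pvPowLeIff mx j).mpr (by omega))
      rw [pvCollect_unfold _ _ hpos, if_neg hle,
        PySem.List.pyRange_one_eq_nil (by exact_mod_cast hej), List.map_nil]

-- dedup of a concatenation and union-with-a-set sort identically
theorem pvSortedSet (l P : List Int) :
    PySem.List.sorted (PySem.Set.ofList (l ++ P)) (fun x => x) false =
    PySem.List.sorted (PySem.Set.union (PySem.Set.ofList l) P) (fun x => x) false := by
  apply (PySem.List.sorted_id_eq_sorted_id_iff_perm _ _).mpr
  apply (List.perm_ext_iff_of_nodup (PySem.Set.nodup_ofList _)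
    (PySem.Set.nodup_union _ _ (PySem.Set.nodup_ofList _))).mpr
  intro x
  simp [PySem.Set.mem_ofList, PySem.Set.mem_union, List.mem_append]

-- ===== VERDICT (by name: the statement is the Claim_ definition above) =====
theorem generate_scales_up_to_max_py_spec : Claim_equal_generate_scales_up_to_max_py := by
  intro ms mx? ex _
  unfold Spec_generate_scales_up_to_max_py
  unfold generate_scales_up_to_max_py generate_scales_up_to_max_py_alt
  by_cases hms : ms = []
  · simp [hms]
  · simp only [hms, if_false]
    cases ex with
    | true => cases mx? <;> rfl
    | false =>
      cases mx? with
      | none => rfl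
      | some mx =>
        dsimp only
        set top := (PySem.List.max? (PySem.List.sorted ms (fun x => x) false) (fun x => x)).getD 0 with htop
        set filt := (PySem.List.sorted ms (fun x => x) false).filter (fun s => decide (s ≤ mx)) with hfilt
        by_cases hlt : top < mx
        · rw [if_pos hlt]
          have h1 : pvFindNext 1 top = 2 ^ (PySem.Int.bitLength (max top 0)) := by
            have := pvFindNextChar top (top + 1 - 2 ^ 0).toNat 0 le_rfl
            simpa using this
          rw [h1, pvCollectChar mx (mx + 1 - 2 ^ PySem.Int.bitLength (max top 0)).toNat
            (PySem.Int.bitLength (max top 0)) le_rfl]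
          exact pvSortedSet filt _
        · rw [if_neg hlt]
          have hmono : PySem.Int.bitLength (max mx 0) ≤ PySem.Int.bitLength (max top 0) := by
            by_contra hc
            have h1 : (2:Int) ^ PySem.Int.bitLength (max top 0) ≤ mx :=
              (pvPowLeIff mx _).mpr (by omega)
            have h2 := (pvPowLeIff top (PySem.Int.bitLength (max top 0))).mp (by omega)
            omega
          rw [PySem.List.pyRange_one_eq_nil (by exact_mod_cast hmono), List.map_nil]
          have := pvSortedSet filt []
          rw [List.append_nil] at this
          exact this
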